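-- pv_equiv track=rewrite | github.com/qmk/qmk_firmware | lib/python/qmk/cli/generate/develop_changelog.py | pr_body
-- ===== SOURCE A (Python) =====
-- def pr_body(text):
--     """Returns the description from a PR body.
--     """
--     lines = []
--     found = False
--
--     for line in text.split('\n'):
--         if line.startswith('## Description'):
--             found = True
--             continue
--
--         if line.startswith('## Issues Fixed'):
--             found = True
--             lines.append('##### Issues Fixed or Closed by This PR')
--             continue
--
--         if not found:
--             continue
--
--         if line.startswith('##'):
--             found = False
--             continue
--
--         lines.append(line.rstrip())
--
--     new_text = '\n'.join(lines)
--
--     return new_text.strip()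
-- ===== SOURCE B (Python) =====
-- def pr_body(text):
--     """Returns the description from a PR body.
--     """
--     # Pass 1: split the body into sections at lines starting with '##'.
--     # Each section is (header_line_or_None, content_lines); content before
--     # the first header gets header None.
--     sections = []
--     header = None
--     content = []
--     for line in text.split('\n'):
--         if line.startswith('##'):
--             sections.append((header, content))
--             header = line
--             content = []
--         else:
--             content.append(line)
--     sections.append((header, content))
--
--     # Pass 2: keep only Description / Issues Fixed sections.
--     out = []
--     for header, content in sections:
--         if header is None:
--             continue
--         if header.startswith('## Description'):
--             out.extend(l.rstrip() for l in content)
--         elif header.startswith('## Issues Fixed'):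
--             out.append('##### Issues Fixed or Closed by This PR')
--             out.extend(l.rstrip() for l in content)
--
--     return '\n'.join(out).strip()
-- ===== Notes on version B (the rewrite author's own statement) =====
-- stated objective: alternative
-- what changed: Replaces the single-pass state-machine (a 'found' flag toggled while scanning lines) by a two-pass decomposition: first split the body into header-led sections, then render only the Description / Issues-Fixed sections.
import Mathlib
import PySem

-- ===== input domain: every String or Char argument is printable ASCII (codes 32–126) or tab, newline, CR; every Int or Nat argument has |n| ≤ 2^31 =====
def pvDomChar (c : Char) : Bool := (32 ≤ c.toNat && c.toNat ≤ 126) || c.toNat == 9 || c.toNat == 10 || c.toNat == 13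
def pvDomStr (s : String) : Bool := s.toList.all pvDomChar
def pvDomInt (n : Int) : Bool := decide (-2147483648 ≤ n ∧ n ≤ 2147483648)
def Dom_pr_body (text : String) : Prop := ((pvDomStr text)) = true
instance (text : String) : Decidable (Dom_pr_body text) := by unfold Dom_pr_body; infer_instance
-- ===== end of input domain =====

-- B replaces A's single-pass 'found'-flag state machine by a two-pass decomposition
-- (split into header-led sections, then render the wanted sections); same cost.

-- ===== PORT A =====
-- one iteration of A's loop: state = (found, lines)
def prBodyStepA (st : Bool × List String) (line : String) : Bool × List String :=
  if PySem.Str.startswith line "## Description" then (true, st.2)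
  else if PySem.Str.startswith line "## Issues Fixed" then
    (true, st.2 ++ ["##### Issues Fixed or Closed by This PR"])
  else if !st.1 then st
  else if PySem.Str.startswith line "##" then (false, st.2)
  else (st.1, st.2 ++ [PySem.Str.rstrip line])

def pr_body (text : String) : String :=
  -- text.split('\n'): split? is `some` here since the separator is nonempty
  let st := ((PySem.Str.split? text "\n").getD []).foldl prBodyStepA (false, [])
  PySem.Str.strip (PySem.Str.join "\n" st.2)

-- ===== PORT B =====
-- pass 1: split the lines into sections at lines starting with '##'
def collectSections : List String → Option String → List String → List (Option String × List String)
  | [], h, c => [(h, c)]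
  | l :: rest, h, c =>
      if PySem.Str.startswith l "##" then (h, c) :: collectSections rest (some l) []
      else collectSections rest h (c ++ [l])

-- pass 2, one section: lines contributed by a section
def renderSection (s : Option String × List String) : List String :=
  match s.1 with
  | none => []
  | some hd =>
      if PySem.Str.startswith hd "## Description" then s.2.map PySem.Str.rstrip
      else if PySem.Str.startswith hd "## Issues Fixed" then
        "##### Issues Fixed or Closed by This PR" :: s.2.map PySem.Str.rstrip
      else []

def pr_body_alt (text : String) : String :=
  let secs := collectSections ((PySem.Str.split? text "\n").getD []) none []
  let out := secs.foldl (fun a s => a ++ renderSection s) []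
  PySem.Str.strip (PySem.Str.join "\n" out)

-- ===== PRECONDITION & SPEC =====
def Spec_pr_body (text : String) (out : String) : Prop := out = pr_body_alt text
instance (text : String) (out : String) : Decidable (Spec_pr_body text out) := by unfold Spec_pr_body; infer_instance

-- ===== CLAIM (what is proved, stated in full; the proofs are below) =====
def Claim_equal_pr_body : Prop := ∀ (text : String), Dom_pr_body text → Spec_pr_body text (pr_body text)

-- ===== LEMMAS AND PROOFS =====

-- A's 'found' flag after a header line h (false before any header)
def flagOf : Option String → Bool
  | none => false
  | some hd => PySem.Str.startswith hd "## Description" || PySem.Str.startswith hd "## Issues Fixed"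

theorem sw_desc_sh (l : String) (h : PySem.Str.startswith l "## Description" = true) :
    PySem.Str.startswith l "##" = true := by
  simp only [PySem.Str.startswith_eq, PySem.Chars.startswith_iff] at *
  exact List.IsPrefix.trans (by decide) h

theorem sw_iss_sh (l : String) (h : PySem.Str.startswith l "## Issues Fixed" = true) :
    PySem.Str.startswith l "##" = true := by
  simp only [PySem.Str.startswith_eq, PySem.Chars.startswith_iff] at *
  exact List.IsPrefix.trans (by decide) h

theorem render_snoc (h : Option String) (c : List String) (l : String) :
    renderSection (h, c ++ [l]) =
      renderSection (h, c) ++ (if flagOf h then [PySem.Str.rstrip l] else []) := by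
  cases h with
  | none => simp [renderSection, flagOf]
  | some hd =>
      simp only [renderSection, flagOf]
      split_ifs with h1 h2 <;> simp_all

theorem key_invariant : ∀ (ls : List String) (h : Option String) (c acc : List String),
    (ls.foldl prBodyStepA (flagOf h, acc ++ renderSection (h, c))).2
      = (collectSections ls h c).foldl (fun a s => a ++ renderSection s) acc := by
  intro ls
  induction ls with
  | nil => intro h c acc; rfl
  | cons l rest ih =>
      intro h c acc
      by_cases hd : PySem.Str.startswith l "## Description" = true
      · have e1 : renderSection (some l, []) = [] := by
          simp only [renderSection, if_pos hd, List.map_nil]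
        have e2 : flagOf (some l) = true := by
          simp only [flagOf, hd, Bool.true_or]
        have hstep : prBodyStepA (flagOf h, acc ++ renderSection (h, c)) l
            = (true, acc ++ renderSection (h, c)) := by
          simp only [prBodyStepA, if_pos hd]
        have H := ih (some l) [] (acc ++ renderSection (h, c))
        rw [e2, e1, List.append_nil] at H
        simp only [collectSections, if_pos (sw_desc_sh l hd), List.foldl_cons, hstep]
        exact H
      · by_cases hi : PySem.Str.startswith l "## Issues Fixed" = true
        · have e1 : renderSection (some l, []) = ["##### Issues Fixed or Closed by This PR"] := by
            simp only [renderSection, if_neg hd, if_pos hi, List.map_nil]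
          have e2 : flagOf (some l) = true := by
            simp only [flagOf, hi, Bool.or_true]
          have hstep : prBodyStepA (flagOf h, acc ++ renderSection (h, c)) l
              = (true, acc ++ renderSection (h, c) ++ ["##### Issues Fixed or Closed by This PR"]) := by
            simp only [prBodyStepA, if_neg hd, if_pos hi]
          have H := ih (some l) [] (acc ++ renderSection (h, c))
          rw [e2, e1, List.append_assoc] at H
          simp only [collectSections, if_pos (sw_iss_sh l hi), List.foldl_cons, hstep,
            List.append_assoc]
          exact H
        · by_cases hsh : PySem.Str.startswith l "##" = true
          · have e1 : renderSection (some l, []) = [] := by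
              simp only [renderSection, if_neg hd, if_neg hi]
            have e2 : flagOf (some l) = false := by
              rw [flagOf, Bool.or_eq_false_iff]
              exact ⟨by simpa using hd, by simpa using hi⟩
            have hstep : prBodyStepA (flagOf h, acc ++ renderSection (h, c)) l
                = (false, acc ++ renderSection (h, c)) := by
              unfold prBodyStepA
              split_ifs <;> simp_all
            have H := ih (some l) [] (acc ++ renderSection (h, c))
            rw [e2, e1, List.append_nil] at H
            simp only [collectSections, if_pos hsh, List.foldl_cons, hstep]
            exact H
          · have H := ih h (c ++ [l]) acc
            rw [render_snoc] at H
            cases hf : flagOf h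
            · rw [hf, if_neg Bool.false_ne_true, List.append_nil] at H
              have hstep : prBodyStepA (false, acc ++ renderSection (h, c)) l
                  = (false, acc ++ renderSection (h, c)) := by
                unfold prBodyStepA
                split_ifs <;> simp_all
              simp only [collectSections, if_neg hsh, List.foldl_cons, hstep]
              exact H
            · rw [hf, if_pos rfl, ← List.append_assoc] at H
              have hstep : prBodyStepA (true, acc ++ renderSection (h, c)) l
                  = (true, acc ++ renderSection (h, c) ++ [PySem.Str.rstrip l]) := by
                unfold prBodyStepA
                split_ifs <;> simp_all
              simp only [collectSections, if_neg hsh, List.foldl_cons, hstep]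
              exact H

-- ===== VERDICT (by name: the statement is the Claim_ definition above) =====
theorem pr_body_spec : Claim_equal_pr_body := by
  intro text _
  simp only [Spec_pr_body, pr_body, pr_body_alt]
  have H : ((((PySem.Str.split? text "\n").getD []).foldl prBodyStepA (false, [])).2
      = (collectSections ((PySem.Str.split? text "\n").getD []) none []).foldl
          (fun a s => a ++ renderSection s) []) :=
    key_invariant ((PySem.Str.split? text "\n").getD []) none [] []
  rw [H]
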